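-- pv_equiv track=rewrite | github.com/chalesborromeo/Project-2-IT328 | problem2/reduce.py | format_3csp
-- ===== SOURCE A (Python) =====
-- def format_3csp(g_vertices, g_edges, s, t, k):
--     """Render the 3CSP instance in the file format from Problem 1.
--     Internal symbolic names are replaced with integer labels 1..n."""
--     n = len(g_vertices)
--     name_to_idx = {name: i + 1 for i, (name, _) in enumerate(g_vertices)}
--
--     lines = []
--     # Line 1: "<idx><color>" tokens, e.g. "1w 2b 3b ..."
--     lines.append(" ".join(f"{name_to_idx[name]}{c}" for name, c in g_vertices))
--     # Adjacency matrix (undirected, so symmetric)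
--     matrix = [[0] * n for _ in range(n)]
--     for a, b in g_edges:
--         i, j = name_to_idx[a] - 1, name_to_idx[b] - 1
--         matrix[i][j] = 1
--         matrix[j][i] = 1
--     for row in matrix:
--         lines.append(" ".join(str(x) for x in row))
--     lines.append(f"{name_to_idx[s]} {name_to_idx[t]}")
--     lines.append(str(k))
--     return "\n".join(lines) + "\n"
-- ===== SOURCE B (Python) =====
-- def format_3csp(g_vertices, g_edges, s, t, k):
--     """Rows are emitted by runs: per-vertex sorted neighbor columns are collected
--     once, and each row is produced as gaps of '0's between consecutive '1's —
--     no n x n grid is materialized and no per-cell membership test is made."""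
--     n = len(g_vertices)
--     name_to_idx = {name: i + 1 for i, (name, _) in enumerate(g_vertices)}
--
--     nbrs = {}
--     for a, b in g_edges:
--         i, j = name_to_idx[a] - 1, name_to_idx[b] - 1
--         nbrs.setdefault(i, set()).add(j)
--         nbrs.setdefault(j, set()).add(i)
--
--     lines = [" ".join(f"{name_to_idx[name]}{c}" for name, c in g_vertices)]
--     for i in range(n):
--         parts = []
--         prev = -1
--         for c in sorted(nbrs.get(i, ())):
--             parts.extend(["0"] * (c - prev - 1))
--             parts.append("1")
--             prev = c
--         parts.extend(["0"] * (n - 1 - prev))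
--         lines.append(" ".join(parts))
--     lines.append(f"{name_to_idx[s]} {name_to_idx[t]}")
--     lines.append(str(k))
--     return "\n".join(lines) + "\n"
-- ===== Notes on version B (the rewrite author's own statement) =====
-- stated objective: alternative
-- what changed: B replaces A's materialized n x n matrix (allocate zeros, fill loop, render stored rows) by per-vertex neighbor sets; each row is emitted as runs of '0's between the sorted neighbor columns, so no grid cell is ever stored or tested.
import Mathlib
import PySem

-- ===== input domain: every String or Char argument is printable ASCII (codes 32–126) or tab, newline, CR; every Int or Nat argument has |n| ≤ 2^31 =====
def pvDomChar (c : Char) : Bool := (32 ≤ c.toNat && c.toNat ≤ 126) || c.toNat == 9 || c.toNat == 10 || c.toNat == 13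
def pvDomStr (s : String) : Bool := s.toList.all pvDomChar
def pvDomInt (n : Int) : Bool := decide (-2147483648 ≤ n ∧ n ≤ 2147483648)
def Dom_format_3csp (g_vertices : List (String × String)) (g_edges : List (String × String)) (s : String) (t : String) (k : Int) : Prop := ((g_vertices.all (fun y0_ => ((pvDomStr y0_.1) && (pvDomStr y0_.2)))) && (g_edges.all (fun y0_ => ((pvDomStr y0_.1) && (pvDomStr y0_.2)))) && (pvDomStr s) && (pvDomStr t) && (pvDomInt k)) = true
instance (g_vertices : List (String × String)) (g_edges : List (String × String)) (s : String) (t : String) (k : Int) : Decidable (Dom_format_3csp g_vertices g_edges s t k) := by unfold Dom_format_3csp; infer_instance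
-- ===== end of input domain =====

-- B replaces A's materialized n×n matrix (allocate zeros, fill loop over the edges,
-- render each stored row cell by cell) by per-vertex neighbor sets: each row is
-- emitted as runs of '0's between the sorted neighbor columns, so no grid cell is
-- ever stored or tested. Same output; objective: alternative.

-- ===== PORT A =====
-- {name: i + 1 for i, (name, _) in enumerate(g_vertices)} — the identical line occurs in A and B
def pvNameToIdx (g_vertices : List (String × String)) : PySem.Dict String Int :=
  (PySem.List.enumerate g_vertices 0).foldl
    (fun d p => d.insert p.2.1 (p.1 + 1)) PySem.Dict.empty

def format_3csp (g_vertices : List (String × String)) (g_edges : List (String × String)) (s : String) (t : String) (k : Int) : String :=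
  let n := g_vertices.length
  let name_to_idx := pvNameToIdx g_vertices
  -- line 1: " ".join(f"{name_to_idx[name]}{c}" for name, c in g_vertices)
  let line1 := PySem.Str.join " " (g_vertices.map (fun p =>
      PySem.Int.toStr (name_to_idx.getD p.1 0) ++ p.2))
  -- matrix = [[0] * n for _ in range(n)]
  let matrix0 : List (List Int) :=
      (PySem.List.pyRange 0 (n : Int) 1).map (fun _ => List.replicate n (0 : Int))
  -- the fill loop; getD/pyGetD/pySetD are the total forms of the raising
  -- primitives — exact here because Pre_ puts every looked-up name among the
  -- vertex names, so every lookup hits and every index is in range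
  let matrix := g_edges.foldl (fun m p =>
      let i := name_to_idx.getD p.1 0 - 1
      let j := name_to_idx.getD p.2 0 - 1
      let m := PySem.List.pySetD m i (PySem.List.pySetD (PySem.List.pyGetD m i []) j 1)
      PySem.List.pySetD m j (PySem.List.pySetD (PySem.List.pyGetD m j []) i 1)) matrix0
  let lines := [line1]
      ++ matrix.map (fun row => PySem.Str.join " " (row.map (fun x => PySem.Int.toStr x)))
      ++ [PySem.Int.toStr (name_to_idx.getD s 0) ++ " " ++ PySem.Int.toStr (name_to_idx.getD t 0)]
      ++ [PySem.Int.toStr k]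
  PySem.Str.join "\n" lines ++ "\n"

-- ===== PORT B =====
-- the row loop body of Source B: parts = []; prev = -1; for c in cols: parts += ['0']*(c-prev-1) + ['1']; prev = c
-- then parts += ['0']*(n-1-prev).  ['0']*(negative) = [] in Python, exactly .toNat's clamping.
def pvRowFromCols (n : Int) (cols : List Int) : List String :=
  let st := cols.foldl (fun (st : List String × Int) c =>
      (st.1 ++ List.replicate (c - st.2 - 1).toNat "0" ++ ["1"], c)) ([], -1)
  st.1 ++ List.replicate (n - 1 - st.2).toNat "0"

def format_3csp_alt (g_vertices : List (String × String)) (g_edges : List (String × String)) (s : String) (t : String) (k : Int) : String :=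
  let n := g_vertices.length
  let name_to_idx := pvNameToIdx g_vertices
  -- nbrs.setdefault(i, set()).add(j) mutates the set stored at key i (inserting the
  -- key with an empty set first if absent) = Dict.modify with default empty set
  let nbrs : PySem.Dict Int (PySem.Set Int) := g_edges.foldl (fun d p =>
      let i := name_to_idx.getD p.1 0 - 1
      let j := name_to_idx.getD p.2 0 - 1
      let d := d.modify i PySem.Set.empty (fun st => PySem.Set.add st j)
      d.modify j PySem.Set.empty (fun st => PySem.Set.add st i)) PySem.Dict.empty
  let line1 := PySem.Str.join " " (g_vertices.map (fun p =>
      PySem.Int.toStr (name_to_idx.getD p.1 0) ++ p.2))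
  -- sorted(nbrs.get(i, ())) — identity key, injective, so exact on the Set
  let rows := (PySem.List.pyRange 0 (n : Int) 1).map (fun i =>
      PySem.Str.join " " (pvRowFromCols (n : Int)
        (PySem.List.sorted (nbrs.getD i PySem.Set.empty) (fun x => x) false)))
  let lines := [line1]
      ++ rows
      ++ [PySem.Int.toStr (name_to_idx.getD s 0) ++ " " ++ PySem.Int.toStr (name_to_idx.getD t 0)]
      ++ [PySem.Int.toStr k]
  PySem.Str.join "\n" lines ++ "\n"

-- ===== PRECONDITION & SPEC =====
-- Pre_ excludes exactly the inputs on which the Python A raises KeyError: an edge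
-- endpoint, s or t that is not a vertex name (B raises there too).
def Pre_format_3csp (g_vertices : List (String × String)) (g_edges : List (String × String)) (s : String) (t : String) (k : Int) : Prop :=
  (∀ p ∈ g_edges, p.1 ∈ g_vertices.map Prod.fst ∧ p.2 ∈ g_vertices.map Prod.fst) ∧
  s ∈ g_vertices.map Prod.fst ∧ t ∈ g_vertices.map Prod.fst
instance (g_vertices : List (String × String)) (g_edges : List (String × String)) (s : String) (t : String) (k : Int) : Decidable (Pre_format_3csp g_vertices g_edges s t k) := by unfold Pre_format_3csp; infer_instance

def pvWitness_format_3csp : (List (String × String)) × (List (String × String)) × String × String × Int :=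
  ([("a", "w"), ("b", "b"), ("c", "r")], [("a", "b"), ("b", "c")], "a", "c", 3)

def Spec_format_3csp (g_vertices : List (String × String)) (g_edges : List (String × String)) (s : String) (t : String) (k : Int) (out : String) : Prop := out = format_3csp_alt g_vertices g_edges s t k
instance (g_vertices : List (String × String)) (g_edges : List (String × String)) (s : String) (t : String) (k : Int) (out : String) : Decidable (Spec_format_3csp g_vertices g_edges s t k out) := by unfold Spec_format_3csp; infer_instance

-- ===== CLAIM (what is proved, stated in full; the proofs are below) =====
def Claim_equal_format_3csp : Prop := ∀ (g_vertices : List (String × String)) (g_edges : List (String × String)) (s : String) (t : String) (k : Int), Dom_format_3csp g_vertices g_edges s t k → Pre_format_3csp g_vertices g_edges s t k → Spec_format_3csp g_vertices g_edges s t k (format_3csp g_vertices g_edges s t k)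

-- ===== LEMMAS AND PROOFS =====

-- the index dictionary maps every vertex name into 1..n (generalized for induction)
theorem pvIdx_aux (xs : List (String × String)) (st : Int) (d : PySem.Dict String Int) (name : String) :
    (name ∈ xs.map Prod.fst →
      st + 1 ≤ ((PySem.List.enumerate xs st).foldl (fun d p => d.insert p.2.1 (p.1 + 1)) d).getD name 0 ∧
      ((PySem.List.enumerate xs st).foldl (fun d p => d.insert p.2.1 (p.1 + 1)) d).getD name 0 ≤ st + xs.length) ∧
    (name ∉ xs.map Prod.fst →
      ((PySem.List.enumerate xs st).foldl (fun d p => d.insert p.2.1 (p.1 + 1)) d).getD name 0 = d.getD name 0) := by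
  induction xs generalizing st d with
  | nil => simp [PySem.List.enumerate]
  | cons x xs ih =>
    rw [PySem.List.enumerate_cons]
    simp only [List.foldl_cons, List.map_cons, List.mem_cons, List.length_cons]
    have h := ih (st + 1) (d.insert x.1 (st + 1))
    constructor
    · rintro (h1 | h2)
      · by_cases hx : name ∈ xs.map Prod.fst
        · have := h.1 hx; push_cast at this ⊢; omega
        · have := h.2 hx
          rw [this, h1, PySem.Dict.getD_insert_self]
          push_cast; omega
      · have := h.1 h2; push_cast at this ⊢; omega
    · intro hn
      rw [not_or] at hn
      rw [h.2 hn.2, PySem.Dict.getD_insert_of_ne _ _ _ hn.1]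

theorem pvIdx_bound (gv : List (String × String)) (name : String)
    (h : name ∈ gv.map Prod.fst) :
    1 ≤ (pvNameToIdx gv).getD name 0 ∧ (pvNameToIdx gv).getD name 0 ≤ gv.length := by
  have := (pvIdx_aux gv 0 PySem.Dict.empty name).1 h
  unfold pvNameToIdx
  omega

theorem pvGetD_set_lt {α : Type} (l : List α) (i : Nat) (v d : α) (h : i < l.length) (a : Nat) :
    (l.set i v).getD a d = if i = a then v else l.getD a d := by
  simp [List.getD_eq_getElem?_getD, List.getElem?_set, h]
  split_ifs <;> simp_all

-- A's fill loop on the matrix and a pair-collecting fold stay in lockstep: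
-- cell (i, j) of the matrix is 1 exactly when (i, j) is in the set
theorem pvMatrix_inv (idx : String → Int) (n : Nat)
    (ge : List (String × String))
    (hb : ∀ p ∈ ge, (1 ≤ idx p.1 ∧ idx p.1 ≤ n) ∧ (1 ≤ idx p.2 ∧ idx p.2 ≤ n))
    (m : List (List Int)) (pr : PySem.Set (Int × Int))
    (hm : m.length = n) (hrow : ∀ r ∈ m, r.length = n)
    (hcell : ∀ i j : Nat, i < n → j < n →
      (m.getD i []).getD j 0 = if ((i : Int), (j : Int)) ∈ pr then 1 else 0) :
    (ge.foldl (fun m p =>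
      let i := idx p.1 - 1
      let j := idx p.2 - 1
      let m := PySem.List.pySetD m i (PySem.List.pySetD (PySem.List.pyGetD m i []) j 1)
      PySem.List.pySetD m j (PySem.List.pySetD (PySem.List.pyGetD m j []) i 1)) m).length = n ∧
    (∀ r ∈ (ge.foldl (fun m p =>
      let i := idx p.1 - 1
      let j := idx p.2 - 1
      let m := PySem.List.pySetD m i (PySem.List.pySetD (PySem.List.pyGetD m i []) j 1)
      PySem.List.pySetD m j (PySem.List.pySetD (PySem.List.pyGetD m j []) i 1)) m), r.length = n) ∧
    ∀ i j : Nat, i < n → j < n →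
      ((ge.foldl (fun m p =>
        let i := idx p.1 - 1
        let j := idx p.2 - 1
        let m := PySem.List.pySetD m i (PySem.List.pySetD (PySem.List.pyGetD m i []) j 1)
        PySem.List.pySetD m j (PySem.List.pySetD (PySem.List.pyGetD m j []) i 1)) m).getD i []).getD j 0
      = if ((i : Int), (j : Int)) ∈ (ge.foldl (fun pr p =>
          let i := idx p.1 - 1
          let j := idx p.2 - 1
          PySem.Set.add (PySem.Set.add pr (i, j)) (j, i)) pr) then 1 else 0 := by
  induction ge generalizing m pr with
  | nil => exact ⟨hm, hrow, hcell⟩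
  | cons e rest ih =>
    simp only [List.foldl_cons]
    have hbe := hb e (by simp)
    have hi0 : (0 : Int) ≤ idx e.1 - 1 := by omega
    have hj0 : (0 : Int) ≤ idx e.2 - 1 := by omega
    simp only [PySem.List.pySetD_of_nonneg _ _ hi0, PySem.List.pySetD_of_nonneg _ _ hj0,
      PySem.List.pyGetD_of_nonneg _ _ hi0, PySem.List.pyGetD_of_nonneg _ _ hj0]
    set it := (idx e.1 - 1).toNat with hit
    set jt := (idx e.2 - 1).toNat with hjt
    have hitn : it < n := by omega
    have hjtn : jt < n := by omega
    have hci : ((it : Nat) : Int) = idx e.1 - 1 := by omega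
    have hcj : ((jt : Nat) : Int) = idx e.2 - 1 := by omega
    -- row lengths of m
    have hrl : ∀ a : Nat, a < n → (m.getD a []).length = n := by
      intro a ha
      rw [List.getD_eq_getElem m [] (by omega)]
      exact hrow _ (List.getElem_mem _)
    set r1 := (m.getD it []).set jt 1 with hr1
    set m1 := m.set it r1 with hm1
    set r2 := (m1.getD jt []).set it 1 with hr2
    set m2 := m1.set jt r2 with hm2
    have hm1l : m1.length = n := by simp [hm1, hm]
    have hm2l : m2.length = n := by simp [hm2, hm1l]
    have hm1g : ∀ a : Nat, a < n → m1.getD a [] = if it = a then r1 else m.getD a [] := by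
      intro a ha; exact pvGetD_set_lt m it r1 [] (by omega) a
    have hm2g : ∀ a : Nat, a < n → m2.getD a [] = if jt = a then r2 else m1.getD a [] := by
      intro a ha; exact pvGetD_set_lt m1 jt r2 [] (by omega) a
    have hr1l : r1.length = n := by rw [hr1, List.length_set]; exact hrl it hitn
    have hm1jl : (m1.getD jt []).length = n := by
      rw [hm1g jt hjtn]; split_ifs with h
      · exact hr1l
      · exact hrl jt hjtn
    have hr2l : r2.length = n := by
      simp only [hr2, List.length_set]; exact hm1jl
    apply ih (fun p hp => hb p (by simp [hp])) m2 _ hm2l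
    · intro r hr
      rcases List.mem_or_eq_of_mem_set hr with hr' | hr'
      · rcases List.mem_or_eq_of_mem_set hr' with hr'' | hr''
        · exact hrow r hr''
        · subst hr''; exact hr1l
      · subst hr'; exact hr2l
    · intro a b ha hb'
      rw [hm2g a ha]
      have hmem : ∀ q : Int × Int,
          (q ∈ PySem.Set.add (PySem.Set.add pr (idx e.1 - 1, idx e.2 - 1)) (idx e.2 - 1, idx e.1 - 1))
          ↔ (q ∈ pr ∨ q = ((it : Int), (jt : Int)) ∨ q = ((jt : Int), (it : Int))) := by
        intro q
        rw [PySem.Set.mem_add, PySem.Set.mem_add, ← hci, ← hcj]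
        tauto
      simp only [hmem]
      have hab := hcell a b ha hb'
      have hval : (if jt = a then r2 else m1.getD a []).getD b 0
          = if (a = jt ∧ b = it) ∨ (a = it ∧ b = jt) then 1 else (m.getD a []).getD b 0 := by
        by_cases hja : jt = a
        · rw [if_pos hja, hr2, pvGetD_set_lt _ it 1 0 (by rw [hm1jl]; omega) b,
              hm1g jt hjtn]
          by_cases hib : it = b
          · rw [if_pos hib, if_pos (by omega)]
          · rw [if_neg hib]
            by_cases hij : it = jt
            · rw [if_pos hij, hr1, pvGetD_set_lt _ jt 1 0 (by rw [hrl it hitn]; omega) b,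
                  show it = a by omega]
              by_cases hjb : jt = b
              · rw [if_pos hjb, if_pos (by omega)]
              · rw [if_neg hjb, if_neg (by omega)]
            · rw [if_neg hij, hja, if_neg (by omega)]
        · rw [if_neg hja, hm1g a ha]
          by_cases hia : it = a
          · rw [if_pos hia, hr1, pvGetD_set_lt _ jt 1 0 (by rw [hrl it hitn]; omega) b,
                hia]
            by_cases hjb : jt = b
            · rw [if_pos hjb, if_pos (by omega)]
            · rw [if_neg hjb, if_neg (by omega)]
          · rw [if_neg hia, if_neg (by omega)]
      rw [hval, hab]
      have hEq1 : (((a : Nat) : Int), ((b : Nat) : Int)) = (((it : Nat) : Int), ((jt : Nat) : Int))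
          ↔ (a = it ∧ b = jt) := by rw [Prod.mk.injEq]; omega
      have hEq2 : (((a : Nat) : Int), ((b : Nat) : Int)) = (((jt : Nat) : Int), ((it : Nat) : Int))
          ↔ (a = jt ∧ b = it) := by rw [Prod.mk.injEq]; omega
      by_cases hP : (a = jt ∧ b = it) ∨ (a = it ∧ b = jt)
      · rw [if_pos hP, if_pos (by
          rcases hP with h | h
          · exact Or.inr (Or.inr (hEq2.2 h))
          · exact Or.inr (Or.inl (hEq1.2 h)))]
      · rw [if_neg hP]
        by_cases hmem2 : (((a : Nat) : Int), ((b : Nat) : Int)) ∈ pr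
        · rw [if_pos hmem2, if_pos (Or.inl hmem2)]
        · rw [if_neg hmem2, if_neg (by
            rintro (h | h | h)
            exacts [hmem2 h, hP (Or.inr (hEq1.1 h)), hP (Or.inl (hEq2.1 h))])]

-- A's rendered matrix rows are the membership-test rows over the pair set
theorem pvRows_eq (idx : String → Int) (n : Nat)
    (ge : List (String × String))
    (hb : ∀ p ∈ ge, (1 ≤ idx p.1 ∧ idx p.1 ≤ n) ∧ (1 ≤ idx p.2 ∧ idx p.2 ≤ n)) :
    (ge.foldl (fun m p =>
      let i := idx p.1 - 1
      let j := idx p.2 - 1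
      let m := PySem.List.pySetD m i (PySem.List.pySetD (PySem.List.pyGetD m i []) j 1)
      PySem.List.pySetD m j (PySem.List.pySetD (PySem.List.pyGetD m j []) i 1))
      ((PySem.List.pyRange 0 (n : Int) 1).map (fun _ => List.replicate n (0 : Int)))).map
        (fun row => PySem.Str.join " " (row.map (fun x => PySem.Int.toStr x)))
    = (PySem.List.pyRange 0 (n : Int) 1).map (fun i =>
        PySem.Str.join " " ((PySem.List.pyRange 0 (n : Int) 1).map (fun j =>
          if PySem.Set.contains (ge.foldl (fun pr p =>
              let i := idx p.1 - 1
              let j := idx p.2 - 1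
              PySem.Set.add (PySem.Set.add pr (i, j)) (j, i)) PySem.Set.empty) (i, j)
          then "1" else "0"))) := by
  have hlen : (PySem.List.pyRange 0 (n : Int) 1).length = n := by
    rw [PySem.List.length_pyRange_one]; omega
  have h0 := pvMatrix_inv idx n ge hb
      ((PySem.List.pyRange 0 (n : Int) 1).map (fun _ => List.replicate n (0 : Int)))
      PySem.Set.empty
      (by rw [List.length_map, hlen])
      (by intro r hr; simp only [List.mem_map] at hr; obtain ⟨_, _, hr⟩ := hr
          simp [← hr])
      (by intro i j hi hj
          rw [List.getD_eq_getElem _ [] (by rw [List.length_map, hlen]; omega)]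
          simp only [List.getElem_map]
          have hnm : ¬ (((i : Nat) : Int), ((j : Nat) : Int)) ∈ (PySem.Set.empty : PySem.Set (Int × Int)) := by
            simp [PySem.Set.empty]
          rw [if_neg hnm]
          simp)
  obtain ⟨hMl, hMr, hMc⟩ := h0
  apply List.ext_getElem
  · rw [List.length_map, List.length_map, hMl, hlen]
  · intro i h1 h2
    have hiN : i < n := by rw [List.length_map, hlen] at h2; exact h2
    simp only [List.getElem_map, PySem.List.getElem_pyRange_one, zero_add]
    congr 1
    have hrowlen : ∀ (a : Nat) (ha : a < n), ((ge.foldl (fun m p =>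
        let i := idx p.1 - 1
        let j := idx p.2 - 1
        let m := PySem.List.pySetD m i (PySem.List.pySetD (PySem.List.pyGetD m i []) j 1)
        PySem.List.pySetD m j (PySem.List.pySetD (PySem.List.pyGetD m j []) i 1))
        ((PySem.List.pyRange 0 (n : Int) 1).map (fun _ => List.replicate n (0 : Int))))[a]'(by rw [hMl]; omega)).length = n := by
      intro a ha
      exact hMr _ (List.getElem_mem _)
    apply List.ext_getElem
    · rw [List.length_map, hrowlen i hiN, List.length_map, hlen]
    · intro j hj1 hj2
      have hjN : j < n := by rw [List.length_map, hrowlen i hiN] at hj1; exact hj1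
      simp only [List.getElem_map, PySem.List.getElem_pyRange_one, zero_add]
      have hc := hMc i j hiN hjN
      rw [List.getD_eq_getElem _ [] (by rw [hMl]; omega),
          List.getD_eq_getElem _ 0 (by rw [hrowlen i hiN]; omega)] at hc
      rw [hc]
      by_cases hmem : (((i : Nat) : Int), ((j : Nat) : Int)) ∈ (ge.foldl (fun pr p =>
          let i := idx p.1 - 1
          let j := idx p.2 - 1
          PySem.Set.add (PySem.Set.add pr (i, j)) (j, i)) (PySem.Set.empty : PySem.Set (Int × Int)))
      · rw [if_pos hmem, if_pos ((PySem.Set.contains_iff _ _).2 hmem)]; rfl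
      · rw [if_neg hmem, if_neg (fun hc2 => hmem ((PySem.Set.contains_iff _ _).1 hc2))]; rfl

-- one edge step: membership in the pair set and in the neighbor dict stay aligned
theorem pvStep_mem (nb : PySem.Dict Int (PySem.Set Int)) (pr : PySem.Set (Int × Int))
    (i j : Int) (hmem : ∀ a b : Int, ((a, b) ∈ pr) ↔ b ∈ nb.getD a PySem.Set.empty)
    (a b : Int) :
    ((a, b) ∈ PySem.Set.add (PySem.Set.add pr (i, j)) (j, i)) ↔
      b ∈ ((nb.modify i PySem.Set.empty (fun st => PySem.Set.add st j)).modify j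
            PySem.Set.empty (fun st => PySem.Set.add st i)).getD a PySem.Set.empty := by
  simp only [PySem.Dict.getD_modify]
  split_ifs <;> simp_all only [PySem.Set.mem_add, Prod.mk.injEq] <;> tauto

theorem pvStep_nodup (nb : PySem.Dict Int (PySem.Set Int)) (i j : Int)
    (hnd : ∀ a : Int, (nb.getD a PySem.Set.empty).Nodup) (a : Int) :
    (((nb.modify i PySem.Set.empty (fun st => PySem.Set.add st j)).modify j
        PySem.Set.empty (fun st => PySem.Set.add st i)).getD a PySem.Set.empty).Nodup := by
  simp only [PySem.Dict.getD_modify]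
  split_ifs <;>
    first
      | exact hnd _
      | exact PySem.Set.nodup_add _ _ (hnd _)
      | exact PySem.Set.nodup_add _ _ (PySem.Set.nodup_add _ _ (hnd _))

-- B's neighbor-dict fold stays in lockstep with the pair-set fold: j is a recorded
-- neighbor of i exactly when (i, j) is in the pair set; and every stored set is Nodup
theorem pvNbrs_inv (idx : String → Int) (ge : List (String × String))
    (nb : PySem.Dict Int (PySem.Set Int)) (pr : PySem.Set (Int × Int))
    (hnd : ∀ a : Int, (nb.getD a PySem.Set.empty).Nodup)
    (hmem : ∀ a b : Int, ((a, b) ∈ pr) ↔ b ∈ nb.getD a PySem.Set.empty) :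
    (∀ a : Int, ((ge.foldl (fun d p =>
        let i := idx p.1 - 1
        let j := idx p.2 - 1
        let d := d.modify i PySem.Set.empty (fun st => PySem.Set.add st j)
        d.modify j PySem.Set.empty (fun st => PySem.Set.add st i)) nb).getD a PySem.Set.empty).Nodup) ∧
    (∀ a b : Int, ((a, b) ∈ ge.foldl (fun pr p =>
        let i := idx p.1 - 1
        let j := idx p.2 - 1
        PySem.Set.add (PySem.Set.add pr (i, j)) (j, i)) pr) ↔
      b ∈ (ge.foldl (fun d p =>
        let i := idx p.1 - 1
        let j := idx p.2 - 1
        let d := d.modify i PySem.Set.empty (fun st => PySem.Set.add st j)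
        d.modify j PySem.Set.empty (fun st => PySem.Set.add st i)) nb).getD a PySem.Set.empty) := by
  induction ge generalizing nb pr with
  | nil => exact ⟨hnd, hmem⟩
  | cons e rest ih =>
    simp only [List.foldl_cons]
    exact ih _ _ (pvStep_nodup nb _ _ hnd) (pvStep_mem nb pr _ _ hmem)

-- every pair collected by the pair-set fold has both components in [0, n)
theorem pvPr_bounds (idx : String → Int) (n : Nat)
    (ge : List (String × String))
    (hb : ∀ p ∈ ge, (1 ≤ idx p.1 ∧ idx p.1 ≤ n) ∧ (1 ≤ idx p.2 ∧ idx p.2 ≤ n))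
    (pr : PySem.Set (Int × Int))
    (hpr : ∀ q ∈ pr, 0 ≤ q.1 ∧ q.1 < n ∧ 0 ≤ q.2 ∧ q.2 < n) :
    ∀ q ∈ ge.foldl (fun pr p =>
        let i := idx p.1 - 1
        let j := idx p.2 - 1
        PySem.Set.add (PySem.Set.add pr (i, j)) (j, i)) pr,
      0 ≤ q.1 ∧ q.1 < n ∧ 0 ≤ q.2 ∧ q.2 < n := by
  induction ge generalizing pr with
  | nil => exact hpr
  | cons e rest ih =>
    simp only [List.foldl_cons]
    apply ih (fun p hp => hb p (by simp [hp]))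
    intro q hq
    have hbe := hb e (by simp)
    rw [PySem.Set.mem_add, PySem.Set.mem_add] at hq
    rcases hq with (h | h) | h
    · exact hpr q h
    · rw [h]; constructor <;> [omega; constructor <;> [omega; omega]]
    · rw [h]; constructor <;> [omega; constructor <;> [omega; omega]]

-- helper: eq_replicate with an explicit length side condition
theorem pvEq_replicate {α : Type} (l : List α) (a : α) (k : Nat)
    (hmem : ∀ x ∈ l, x = a) (hlen : l.length = k) : l = List.replicate k a := by
  subst hlen
  exact List.eq_replicate_of_mem hmem

-- the run construction: gaps of '0's between a strictly increasing list of columns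
-- produce exactly the per-column 0/1 tokens
theorem pvRun (n : Int) (cols : List Int) : ∀ (acc : List String) (prev : Int),
    cols.Pairwise (· < ·) → (∀ c ∈ cols, prev < c ∧ c < n) →
    (cols.foldl (fun (st : List String × Int) c =>
        (st.1 ++ List.replicate (c - st.2 - 1).toNat "0" ++ ["1"], c)) (acc, prev)).1
      ++ List.replicate (n - 1 - (cols.foldl (fun (st : List String × Int) c =>
        (st.1 ++ List.replicate (c - st.2 - 1).toNat "0" ++ ["1"], c)) (acc, prev)).2).toNat "0"
    = acc ++ (PySem.List.pyRange (prev + 1) n 1).map (fun j => if j ∈ cols then "1" else "0") := by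
  induction cols with
  | nil =>
    intro acc prev _ _
    simp only [List.foldl_nil]
    congr 1
    refine (pvEq_replicate _ _ _ ?_ ?_).symm
    · intro x hx
      simp only [List.mem_map] at hx
      obtain ⟨c, _, hc⟩ := hx
      simp [← hc]
    · rw [List.length_map, PySem.List.length_pyRange_one]
      omega
  | cons c cs ih =>
    intro acc prev hp hbnd
    have hpc := hbnd c (by simp)
    have hcs : ∀ d ∈ cs, c < d ∧ d < n := by
      intro d hd
      exact ⟨List.rel_of_pairwise_cons hp hd, (hbnd d (by simp [hd])).2⟩
    simp only [List.foldl_cons]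
    rw [ih (acc ++ List.replicate (c - prev - 1).toNat "0" ++ ["1"]) c (List.Pairwise.of_cons hp) hcs]
    rw [PySem.List.pyRange_one_append (prev + 1) (c + 1) n (by omega) (by omega)]
    rw [PySem.List.pyRange_one_succ_right (show prev + 1 ≤ c by omega)]
    simp only [List.map_append]
    have h1 : (PySem.List.pyRange (prev + 1) c 1).map (fun j => if j ∈ c :: cs then "1" else "0")
        = List.replicate (c - prev - 1).toNat "0" := by
      refine pvEq_replicate _ _ _ ?_ ?_
      · intro x hx
        simp only [List.mem_map] at hx
        obtain ⟨j, hj, hjx⟩ := hx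
        rw [PySem.List.mem_pyRange_one] at hj
        have hjn : j ∉ c :: cs := by
          simp only [List.mem_cons, not_or]
          exact ⟨by omega, fun hjc => by have := (hcs j hjc).1; omega⟩
        rw [← hjx, if_neg hjn]
      · rw [List.length_map, PySem.List.length_pyRange_one]
        omega
    have h2 : ([c] : List Int).map (fun j => if j ∈ c :: cs then "1" else "0") = ["1"] := by
      simp
    have h3 : (PySem.List.pyRange (c + 1) n 1).map (fun j => if j ∈ c :: cs then "1" else "0")
        = (PySem.List.pyRange (c + 1) n 1).map (fun j => if j ∈ cs then "1" else "0") := by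
      apply List.map_congr_left
      intro j hj
      rw [PySem.List.mem_pyRange_one] at hj
      have hiff : (j ∈ c :: cs) ↔ (j ∈ cs) := by
        simp only [List.mem_cons]
        constructor
        · rintro (h | h)
          · omega
          · exact h
        · exact Or.inr
      simp only [hiff]
    rw [h1, h2, h3]
    simp [List.append_assoc]

-- B's run-built rows equal the membership-test rows over the pair set
theorem pvRowsB_eq (idx : String → Int) (n : Nat)
    (ge : List (String × String))
    (hb : ∀ p ∈ ge, (1 ≤ idx p.1 ∧ idx p.1 ≤ n) ∧ (1 ≤ idx p.2 ∧ idx p.2 ≤ n)) :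
    (PySem.List.pyRange 0 (n : Int) 1).map (fun i =>
      PySem.Str.join " " (pvRowFromCols (n : Int)
        (PySem.List.sorted ((ge.foldl (fun d p =>
            let i := idx p.1 - 1
            let j := idx p.2 - 1
            let d := d.modify i PySem.Set.empty (fun st => PySem.Set.add st j)
            d.modify j PySem.Set.empty (fun st => PySem.Set.add st i)) PySem.Dict.empty).getD i PySem.Set.empty)
          (fun x => x) false)))
    = (PySem.List.pyRange 0 (n : Int) 1).map (fun i =>
        PySem.Str.join " " ((PySem.List.pyRange 0 (n : Int) 1).map (fun j =>
          if PySem.Set.contains (ge.foldl (fun pr p =>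
              let i := idx p.1 - 1
              let j := idx p.2 - 1
              PySem.Set.add (PySem.Set.add pr (i, j)) (j, i)) PySem.Set.empty) (i, j)
          then "1" else "0"))) := by
  have hinv := pvNbrs_inv idx ge PySem.Dict.empty PySem.Set.empty
      (by intro a; rw [PySem.Dict.getD_empty]; exact List.nodup_nil)
      (by intro a b; rw [PySem.Dict.getD_empty]; simp [PySem.Set.empty])
  obtain ⟨hnd, hmem⟩ := hinv
  have hbnds := pvPr_bounds idx n ge hb PySem.Set.empty (by simp [PySem.Set.empty])
  apply List.map_congr_left
  intro i hi
  congr 1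
  set prF := ge.foldl (fun pr p =>
      let i := idx p.1 - 1
      let j := idx p.2 - 1
      PySem.Set.add (PySem.Set.add pr (i, j)) (j, i)) (PySem.Set.empty : PySem.Set (Int × Int)) with hprF
  set S := (ge.foldl (fun d p =>
      let i := idx p.1 - 1
      let j := idx p.2 - 1
      let d := d.modify i PySem.Set.empty (fun st => PySem.Set.add st j)
      d.modify j PySem.Set.empty (fun st => PySem.Set.add st i)) PySem.Dict.empty).getD i PySem.Set.empty with hS
  set cols := PySem.List.sorted S (fun x => x) false with hcols
  have hmemS : ∀ b, b ∈ cols ↔ (i, b) ∈ prF := by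
    intro b
    rw [hcols, PySem.List.mem_sorted, hS, ← hmem i b]
  have hPairLe : cols.Pairwise (fun a b => a ≤ b) := PySem.List.sorted_pairwise S (fun x => x)
  have hNodup : cols.Nodup := ((PySem.List.sorted_perm S (fun x => x) false).nodup_iff).2 (hnd i)
  have hPairLt : cols.Pairwise (· < ·) := by
    have := List.Pairwise.and hPairLe hNodup
    exact this.imp (fun h => lt_of_le_of_ne h.1 h.2)
  have hbc : ∀ c ∈ cols, (-1 : Int) < c ∧ c < n := by
    intro c hc
    have := hbnds (i, c) ((hmemS c).1 hc)
    exact ⟨by omega, by omega⟩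
  unfold pvRowFromCols
  have hrun := pvRun (n : Int) cols [] (-1) hPairLt hbc
  simp only [neg_add_cancel] at hrun
  rw [hrun]
  simp only [List.nil_append]
  apply List.map_congr_left
  intro j hj
  by_cases hmj : (i, j) ∈ prF
  · rw [if_pos ((hmemS j).2 hmj), if_pos ((PySem.Set.contains_iff _ _).2 hmj)]
  · rw [if_neg (fun h => hmj ((hmemS j).1 h)),
        if_neg (fun h => hmj ((PySem.Set.contains_iff _ _).1 h))]

-- ===== VERDICT (by name: the statement is the Claim_ definition above) =====
theorem format_3csp_spec : Claim_equal_format_3csp := by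
  intro gv ge s t k _ hpre
  unfold Spec_format_3csp format_3csp format_3csp_alt
  obtain ⟨hedges, hs, ht⟩ := hpre
  have hb : ∀ p ∈ ge, (1 ≤ (pvNameToIdx gv).getD p.1 0 ∧ (pvNameToIdx gv).getD p.1 0 ≤ gv.length) ∧
      (1 ≤ (pvNameToIdx gv).getD p.2 0 ∧ (pvNameToIdx gv).getD p.2 0 ≤ gv.length) :=
    fun p hp => ⟨pvIdx_bound gv p.1 (hedges p hp).1, pvIdx_bound gv p.2 (hedges p hp).2⟩
  have hrows := pvRows_eq (fun a => (pvNameToIdx gv).getD a 0) gv.length ge hb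
  have hrowsB := pvRowsB_eq (fun a => (pvNameToIdx gv).getD a 0) gv.length ge hb
  simp only at hrows hrowsB ⊢
  rw [hrows, hrowsB]
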